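-- pv_equiv track=rewrite | github.com/AtthoriqDayo/Validasi_Plat_Nomot_Indonesia | semester 5/teori Graf/DFA/myapp/views.py | fix_confusions
-- ===== SOURCE A (Python) =====
-- def fix_confusions(text, is_digit_zone):
--     """
--     Swaps commonly confused characters based on where they are.
--     """
--     # If we expect NUMBERS but got letters:
--     if is_digit_zone:
--         replacements = {'O': '0', 'D': '0', 'Q': '0', 'U': '0',
--                         'I': '1', 'L': '1',
--                         'S': '5', 'B': '8', 'Z': '2', 'A': '4'}
--     # If we expect LETTERS but got numbers:
--     else:
--         replacements = {'0': 'O', '1': 'I', '5': 'S', '8': 'B', '4': 'A', '2': 'Z'}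
--
--     for bad, good in replacements.items():
--         text = text.replace(bad, good)
--     return text
-- ===== SOURCE B (Python) =====
-- def fix_confusions(text, is_digit_zone):
--     if is_digit_zone:
--         replacements = {'O': '0', 'D': '0', 'Q': '0', 'U': '0',
--                         'I': '1', 'L': '1',
--                         'S': '5', 'B': '8', 'Z': '2', 'A': '4'}
--     else:
--         replacements = {'0': 'O', '1': 'I', '5': 'S', '8': 'B', '4': 'A', '2': 'Z'}
--     return ''.join(replacements.get(c, c) for c in text)
-- ===== Notes on version B (the rewrite author's own statement) =====
-- stated objective: idiomatic
-- what changed: A makes one full-string str.replace pass per dict entry (10 or 6 passes); B makes a single pass over the characters, substituting each via replacements.get(c, c) and joining, which is equivalent because keys and values are disjoint within each dict so sequential replaces never cascade.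
import Mathlib
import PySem

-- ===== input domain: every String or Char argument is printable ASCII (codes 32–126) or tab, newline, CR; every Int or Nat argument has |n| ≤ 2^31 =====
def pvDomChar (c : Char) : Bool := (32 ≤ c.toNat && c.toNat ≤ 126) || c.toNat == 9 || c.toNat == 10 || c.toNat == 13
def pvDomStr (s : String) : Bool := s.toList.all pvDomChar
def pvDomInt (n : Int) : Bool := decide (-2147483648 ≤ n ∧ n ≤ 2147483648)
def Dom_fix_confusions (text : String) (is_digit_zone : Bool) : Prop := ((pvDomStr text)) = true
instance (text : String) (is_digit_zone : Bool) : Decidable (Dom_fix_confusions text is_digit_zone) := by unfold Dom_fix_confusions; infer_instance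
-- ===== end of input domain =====

-- B replaces A's per-entry full-string str.replace loop with a single pass over
-- the characters using dict.get (objective: idiomatic single-pass substitution).

-- ===== PORT A =====
-- A's literal replacement dicts, iterated in insertion order via .items()
def fixA_digitItems : List (String × String) :=
  [("O", "0"), ("D", "0"), ("Q", "0"), ("U", "0"),
   ("I", "1"), ("L", "1"),
   ("S", "5"), ("B", "8"), ("Z", "2"), ("A", "4")]

def fixA_letterItems : List (String × String) :=
  [("0", "O"), ("1", "I"), ("5", "S"), ("8", "B"), ("4", "A"), ("2", "Z")]

def fix_confusions (text : String) (is_digit_zone : Bool) : String :=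
  let replacements := if is_digit_zone then fixA_digitItems else fixA_letterItems
  replacements.foldl (fun t p => PySem.Str.replace t p.1 p.2) text

-- ===== PORT B =====
-- B's replacement dicts (single-char keys/values, as B looks chars up with .get)
def fixB_digitDict : PySem.Dict Char Char :=
  ⟨[('O', '0'), ('D', '0'), ('Q', '0'), ('U', '0'),
    ('I', '1'), ('L', '1'),
    ('S', '5'), ('B', '8'), ('Z', '2'), ('A', '4')]⟩

def fixB_letterDict : PySem.Dict Char Char :=
  ⟨[('0', 'O'), ('1', 'I'), ('5', 'S'), ('8', 'B'), ('4', 'A'), ('2', 'Z')]⟩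

def fix_confusions_alt (text : String) (is_digit_zone : Bool) : String :=
  let replacements := if is_digit_zone then fixB_digitDict else fixB_letterDict
  String.ofList (text.toList.map (fun c => replacements.getD c c))

-- ===== PRECONDITION & SPEC =====
def Spec_fix_confusions (text : String) (is_digit_zone : Bool) (out : String) : Prop := out = fix_confusions_alt text is_digit_zone
instance (text : String) (is_digit_zone : Bool) (out : String) : Decidable (Spec_fix_confusions text is_digit_zone out) := by unfold Spec_fix_confusions; infer_instance

-- ===== CLAIM (what is proved, stated in full; the proofs are below) =====
def Claim_equal_fix_confusions : Prop := ∀ (text : String) (is_digit_zone : Bool), Dom_fix_confusions text is_digit_zone → Spec_fix_confusions text is_digit_zone (fix_confusions text is_digit_zone)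

-- ===== LEMMAS AND PROOFS =====

-- A's items lists, as character pairs (proof-side view of the same literals)
def digitCharPairs : List (Char × Char) :=
  [('O', '0'), ('D', '0'), ('Q', '0'), ('U', '0'),
   ('I', '1'), ('L', '1'),
   ('S', '5'), ('B', '8'), ('Z', '2'), ('A', '4')]

def letterCharPairs : List (Char × Char) :=
  [('0', 'O'), ('1', 'I'), ('5', 'S'), ('8', 'B'), ('4', 'A'), ('2', 'Z')]

theorem fixA_digitItems_eq :
    fixA_digitItems = digitCharPairs.map (fun p => (String.ofList [p.1], String.ofList [p.2])) := by
  decide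

theorem fixA_letterItems_eq :
    fixA_letterItems = letterCharPairs.map (fun p => (String.ofList [p.1], String.ofList [p.2])) := by
  decide

-- single-character replace is a pointwise map
theorem replace_go_single (b g : Char) :
    ∀ (l acc : List Char),
      PySem.Chars.replace.go [b] [g] l.length l acc =
        acc.reverse ++ l.map (fun c => if c = b then g else c) := by
  intro l
  induction l with
  | nil => intro acc; simp [PySem.Chars.replace.go]
  | cons c t ih =>
    intro acc
    by_cases h : b = c
    · subst h
      simpa [PySem.Chars.replace.go, List.isPrefixOf] using ih (g :: acc)
    · have hne : ¬ c = b := fun hc => h hc.symm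
      simp [PySem.Chars.replace.go, List.isPrefixOf, h, hne, ih (c :: acc)]

theorem replace_single (b g : Char) (l : List Char) :
    PySem.Chars.replace l [b] [g] = l.map (fun c => if c = b then g else c) := by
  simpa [PySem.Chars.replace] using replace_go_single b g l []

-- applying all pairs, in order, to one character
def applyAll (ps : List (Char × Char)) (c : Char) : Char :=
  ps.foldl (fun x p => if x = p.1 then p.2 else x) c

-- A's whole fold of single-character replaces = one map of applyAll
theorem foldl_replace_single :
    ∀ (ps : List (Char × Char)) (s : String),
      (ps.map (fun p => (String.ofList [p.1], String.ofList [p.2]))).foldl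
          (fun t p => PySem.Str.replace t p.1 p.2) s =
        String.ofList (s.toList.map (applyAll ps)) := by
  intro ps
  induction ps with
  | nil => intro s; simp [show applyAll [] = id from rfl]
  | cons p ps ih =>
    intro s
    simp only [List.map_cons, List.foldl_cons, ih]
    simp only [PySem.Str.replace, String.toList_ofList, replace_single, List.map_map]
    exact congrArg String.ofList
      (List.map_congr_left fun c _ => by simp [applyAll, Function.comp])

-- pointwise agreement of A's pair chain with B's dict lookup
theorem applyAll_digit (c : Char) :
    applyAll digitCharPairs c = fixB_digitDict.getD c c := by
  by_cases h1 : c = 'O'; · subst h1; decide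
  by_cases h2 : c = 'D'; · subst h2; decide
  by_cases h3 : c = 'Q'; · subst h3; decide
  by_cases h4 : c = 'U'; · subst h4; decide
  by_cases h5 : c = 'I'; · subst h5; decide
  by_cases h6 : c = 'L'; · subst h6; decide
  by_cases h7 : c = 'S'; · subst h7; decide
  by_cases h8 : c = 'B'; · subst h8; decide
  by_cases h9 : c = 'Z'; · subst h9; decide
  by_cases h10 : c = 'A'; · subst h10; decide
  simp [applyAll, digitCharPairs, fixB_digitDict, PySem.Dict.getD, PySem.Dict.get?,
    h1, h2, h3, h4, h5, h6, h7, h8, h9, h10,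
    Ne.symm h1, Ne.symm h2, Ne.symm h3, Ne.symm h4, Ne.symm h5,
    Ne.symm h6, Ne.symm h7, Ne.symm h8, Ne.symm h9, Ne.symm h10]

theorem applyAll_letter (c : Char) :
    applyAll letterCharPairs c = fixB_letterDict.getD c c := by
  by_cases h1 : c = '0'; · subst h1; decide
  by_cases h2 : c = '1'; · subst h2; decide
  by_cases h3 : c = '5'; · subst h3; decide
  by_cases h4 : c = '8'; · subst h4; decide
  by_cases h5 : c = '4'; · subst h5; decide
  by_cases h6 : c = '2'; · subst h6; decide
  simp [applyAll, letterCharPairs, fixB_letterDict, PySem.Dict.getD, PySem.Dict.get?,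
    h1, h2, h3, h4, h5, h6,
    Ne.symm h1, Ne.symm h2, Ne.symm h3, Ne.symm h4, Ne.symm h5, Ne.symm h6]

-- ===== VERDICT (by name: the statement is the Claim_ definition above) =====
theorem fix_confusions_spec : Claim_equal_fix_confusions := by
  intro text is_digit_zone _
  show fix_confusions text is_digit_zone = fix_confusions_alt text is_digit_zone
  cases is_digit_zone
  · show fixA_letterItems.foldl (fun t p => PySem.Str.replace t p.1 p.2) text =
      String.ofList (text.toList.map (fun c => fixB_letterDict.getD c c))
    rw [fixA_letterItems_eq, foldl_replace_single]
    exact congrArg String.ofList (List.map_congr_left fun c _ => applyAll_letter c)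
  · show fixA_digitItems.foldl (fun t p => PySem.Str.replace t p.1 p.2) text =
      String.ofList (text.toList.map (fun c => fixB_digitDict.getD c c))
    rw [fixA_digitItems_eq, foldl_replace_single]
    exact congrArg String.ofList (List.map_congr_left fun c _ => applyAll_digit c)
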